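-- pv_equiv track=rewrite | github.com/nenuadrian/GradientHound | src/gradienthound/_dashboard/_helpers.py | module_category
-- ===== SOURCE A (Python) =====
-- def module_category(type_name: str) -> str:
--     lower = type_name.lower()
--     for key in ("conv", "linear", "norm", "pool", "dropout", "embed"):
--         if key in lower:
--             return key
--     if any(k in lower for k in ("relu", "gelu", "silu", "sigmoid", "tanh", "softmax", "activation")):
--         return "activation"
--     return "default"
-- ===== SOURCE B (Python) =====
-- def module_category(type_name: str) -> str:
--     # Multi-pattern single scan: walk the string positions once, collecting the
--     # set of every key that matches at some offset, then resolve by priority.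
--     lower = type_name.lower()
--     keys = ("conv", "linear", "norm", "pool", "dropout", "embed",
--             "relu", "gelu", "silu", "sigmoid", "tanh", "softmax", "activation")
--     found = set()
--     for i in range(len(lower)):
--         for k in keys:
--             if lower.startswith(k, i):
--                 found.add(k)
--     for k in ("conv", "linear", "norm", "pool", "dropout", "embed"):
--         if k in found:
--             return k
--     return "activation" if found else "default"
-- ===== Notes on version B (the rewrite author's own statement) =====
-- stated objective: alternative
-- what changed: B scans the string positions once, collecting the set of all keys matching at any offset (a multi-pattern position scan), then resolves the category by priority over that set; A instead runs a separate early-return substring search per key plus an any() pass for the activation keys.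
import Mathlib
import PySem

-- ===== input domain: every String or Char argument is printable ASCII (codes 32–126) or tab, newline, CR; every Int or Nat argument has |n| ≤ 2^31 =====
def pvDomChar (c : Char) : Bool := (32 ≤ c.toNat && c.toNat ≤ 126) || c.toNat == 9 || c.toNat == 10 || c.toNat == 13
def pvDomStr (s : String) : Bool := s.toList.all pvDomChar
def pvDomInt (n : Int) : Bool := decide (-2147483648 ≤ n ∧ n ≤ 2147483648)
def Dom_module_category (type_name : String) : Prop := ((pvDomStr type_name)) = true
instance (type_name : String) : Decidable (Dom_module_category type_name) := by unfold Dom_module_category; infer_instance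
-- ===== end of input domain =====

-- B replaces A's per-key early-return substring searches by one multi-pattern scan
-- over the string positions, collecting the set of matching keys, then a priority
-- resolution over that set; same asymptotic cost, different traversal ("alternative").

-- ===== PORT A =====
-- the tuple of self-mapping keys A loops over
def pvKeysA : List String := ["conv", "linear", "norm", "pool", "dropout", "embed"]
-- 'for key in (...): if key in lower: return key'
def pvLoopA (lower : String) : List String → Option String
  | [] => none
  | k :: ks => if PySem.Str.isIn k lower then some k else pvLoopA lower ks

def module_category (type_name : String) : String :=
  let lower := PySem.Str.lower type_name
  match pvLoopA lower pvKeysA with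
  | some k => k
  | none =>
    if (["relu", "gelu", "silu", "sigmoid", "tanh", "softmax", "activation"].any
          (fun k => PySem.Str.isIn k lower)) then "activation" else "default"

-- ===== PORT B =====
-- the tuple 'keys' of Source B
def pvKeysAll : List String :=
  ["conv", "linear", "norm", "pool", "dropout", "embed",
   "relu", "gelu", "silu", "sigmoid", "tanh", "softmax", "activation"]
-- 'for i in range(len(lower)): for k in keys: if lower.startswith(k, i): found.add(k)'
-- lower.startswith(k, i) with 0 ≤ i ≤ len(lower) is exactly 'k is a prefix of lower[i:]'
def pvFound (cs : List Char) : PySem.Set String :=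
  (List.range cs.length).foldl
    (fun s i =>
      pvKeysAll.foldl
        (fun s k => if PySem.Chars.startswith (cs.drop i) k.toList then PySem.Set.add s k else s)
        s)
    PySem.Set.empty
-- 'for k in (six): if k in found: return k'
def pvResolve (found : PySem.Set String) : List String → Option String
  | [] => none
  | k :: ks => if PySem.Set.contains found k then some k else pvResolve found ks

def module_category_alt (type_name : String) : String :=
  let lower := PySem.Str.lower type_name
  let found := pvFound lower.toList
  match pvResolve found pvKeysA with
  | some k => k
  | none => if found.isEmpty then "default" else "activation"

-- ===== PRECONDITION & SPEC =====
def Spec_module_category (type_name : String) (out : String) : Prop := out = module_category_alt type_name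
instance (type_name : String) (out : String) : Decidable (Spec_module_category type_name out) := by unfold Spec_module_category; infer_instance

-- ===== CLAIM (what is proved, stated in full; the proofs are below) =====
def Claim_equal_module_category : Prop := ∀ (type_name : String), Dom_module_category type_name → Spec_module_category type_name (module_category type_name)

-- ===== LEMMAS AND PROOFS =====

-- membership in a conditional-add fold
lemma mem_condFoldAdd (l : List String) (p : String → Bool) (s : PySem.Set String) (y : String) :
    y ∈ l.foldl (fun s k => if p k then PySem.Set.add s k else s) s ↔ y ∈ s ∨ (y ∈ l ∧ p y = true) := by
  induction l generalizing s with
  | nil => simp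
  | cons k ks ih =>
    simp only [List.foldl_cons, ih, List.mem_cons]
    by_cases hk : p k = true
    · rw [if_pos hk, PySem.Set.mem_add]
      constructor
      · rintro (⟨h | rfl⟩ | ⟨h, hp⟩)
        · exact Or.inl h
        · exact Or.inr ⟨Or.inl rfl, hk⟩
        · exact Or.inr ⟨Or.inr h, hp⟩
      · rintro (h | ⟨(rfl | h), hp⟩)
        · exact Or.inl (Or.inl h)
        · exact Or.inl (Or.inr rfl)
        · exact Or.inr ⟨h, hp⟩
    · rw [if_neg hk]
      constructor
      · rintro (h | ⟨h, hp⟩)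
        · exact Or.inl h
        · exact Or.inr ⟨Or.inr h, hp⟩
      · rintro (h | ⟨(rfl | h), hp⟩)
        · exact Or.inl h
        · exact absurd hp hk
        · exact Or.inr ⟨h, hp⟩

lemma mem_pvFound (cs : List Char) (y : String) :
    y ∈ pvFound cs ↔ y ∈ pvKeysAll ∧ ∃ i < cs.length, PySem.Chars.startswith (cs.drop i) y.toList = true := by
  unfold pvFound
  have main : ∀ (rng : List Nat) (s : PySem.Set String),
      y ∈ rng.foldl (fun s i => pvKeysAll.foldl
        (fun s k => if PySem.Chars.startswith (cs.drop i) k.toList then PySem.Set.add s k else s) s) s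
      ↔ y ∈ s ∨ (y ∈ pvKeysAll ∧ ∃ i ∈ rng, PySem.Chars.startswith (cs.drop i) y.toList = true) := by
    intro rng
    induction rng with
    | nil => simp
    | cons i is ih =>
      intro s
      simp only [List.foldl_cons, ih, mem_condFoldAdd, List.mem_cons]
      constructor
      · rintro (⟨h | ⟨hm, hp⟩⟩ | ⟨hm, j, hj, hp⟩)
        · exact Or.inl h
        · exact Or.inr ⟨hm, i, Or.inl rfl, hp⟩
        · exact Or.inr ⟨hm, j, Or.inr hj, hp⟩
      · rintro (h | ⟨hm, j, (rfl | hj), hp⟩)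
        · exact Or.inl (Or.inl h)
        · exact Or.inl (Or.inr ⟨hm, hp⟩)
        · exact Or.inr ⟨hm, j, hj, hp⟩
  rw [main]
  simp [PySem.Set.empty, List.mem_range]

-- occurrence of a nonempty pattern as a substring ↔ it matches at some position < length
lemma isIn_iff_found (cs : List Char) (k : String) (hk : k.toList ≠ []) :
    PySem.Chars.isIn k.toList cs = true ↔ ∃ i < cs.length, PySem.Chars.startswith (cs.drop i) k.toList = true := by
  rw [← PySem.Chars.exists_prefix_drop_iff_isIn]
  constructor
  · rintro ⟨j, hj⟩
    by_cases hjl : j < cs.length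
    · exact ⟨j, hjl, (PySem.Chars.startswith_iff _ _).mpr hj⟩
    · exfalso
      rw [List.drop_eq_nil_of_le (le_of_not_gt hjl)] at hj
      exact hk (List.prefix_nil.mp hj)
  · rintro ⟨i, _, hp⟩
    exact ⟨i, (PySem.Chars.startswith_iff _ _).mp hp⟩

-- for each of the 13 concrete keys: k ∈ pvFound cs ↔ 'k in lower'
lemma mem_pvFound_iff_isIn (cs : List Char) (k : String) (hmem : k ∈ pvKeysAll) (hk : k.toList ≠ []) :
    (k ∈ pvFound cs) ↔ PySem.Chars.isIn k.toList cs = true := by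
  rw [mem_pvFound, isIn_iff_found cs k hk]
  tauto

lemma contains_pvFound (cs : List Char) (k : String) (hmem : k ∈ pvKeysAll) (hk : k.toList ≠ []) :
    PySem.Set.contains (pvFound cs) k = PySem.Chars.isIn k.toList cs := by
  by_cases h : PySem.Chars.isIn k.toList cs = true
  · rw [h]
    exact (PySem.Set.contains_iff _ _).mpr ((mem_pvFound_iff_isIn cs k hmem hk).mpr h)
  · have hf : PySem.Set.contains (pvFound cs) k = false := by
      rw [Bool.eq_false_iff]
      intro hc
      exact h ((mem_pvFound_iff_isIn cs k hmem hk).mp ((PySem.Set.contains_iff _ _).mp hc))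
    rw [hf, Bool.eq_false_iff.mpr h]

lemma pvFound_empty_iff (cs : List Char) :
    (pvFound cs).isEmpty = true ↔ ∀ k ∈ pvKeysAll, PySem.Chars.isIn k.toList cs = false := by
  rw [List.isEmpty_iff]
  constructor
  · intro h k hmem
    rw [Bool.eq_false_iff]
    intro hin
    have hk : k.toList ≠ [] := by
      fin_cases hmem <;> simp
    have : k ∈ pvFound cs := (mem_pvFound_iff_isIn cs k hmem hk).mpr hin
    rw [h] at this
    exact absurd this (List.not_mem_nil)
  · intro h
    by_contra hne
    obtain ⟨y, hy⟩ := List.exists_mem_of_ne_nil _ hne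
    obtain ⟨hmem, i, _, hp⟩ := (mem_pvFound cs y).mp hy
    have hk : y.toList ≠ [] := by
      fin_cases hmem <;> simp
    have : PySem.Chars.isIn y.toList cs = true :=
      (isIn_iff_found cs y hk).mpr ⟨i, by assumption, hp⟩
    rw [h y hmem] at this
    exact Bool.false_ne_true this

-- Str.isIn on the lowered string, as Chars.isIn on its toList
lemma strIsIn_toList (k s : String) : PySem.Str.isIn k s = PySem.Chars.isIn k.toList s.toList := by
  simp [PySem.Str.isIn]

-- ===== VERDICT (by name: the statement is the Claim_ definition above) =====
set_option maxHeartbeats 2000000 in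
theorem module_category_spec : Claim_equal_module_category := by
  intro type_name _
  unfold Spec_module_category module_category module_category_alt
  generalize PySem.Str.lower type_name = s
  have hc : ∀ k, k ∈ pvKeysAll → k.toList ≠ [] → PySem.Set.contains (pvFound s.toList) k = PySem.Chars.isIn k.toList s.toList :=
    fun k h1 h2 => contains_pvFound s.toList k h1 h2
  have e1 := hc "conv" (by simp [pvKeysAll]) (by simp)
  have e2 := hc "linear" (by simp [pvKeysAll]) (by simp)
  have e3 := hc "norm" (by simp [pvKeysAll]) (by simp)
  have e4 := hc "pool" (by simp [pvKeysAll]) (by simp)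
  have e5 := hc "dropout" (by simp [pvKeysAll]) (by simp)
  have e6 := hc "embed" (by simp [pvKeysAll]) (by simp)
  simp only [pvKeysA, pvLoopA, pvResolve, e1, e2, e3, e4, e5, e6, strIsIn_toList]
  by_cases h1 : PySem.Chars.isIn "conv".toList s.toList = true
  · rw [if_pos h1]
  rw [if_neg h1]
  by_cases h2 : PySem.Chars.isIn "linear".toList s.toList = true
  · rw [if_pos h2]
  rw [if_neg h2]
  by_cases h3 : PySem.Chars.isIn "norm".toList s.toList = true
  · rw [if_pos h3]
  rw [if_neg h3]
  by_cases h4 : PySem.Chars.isIn "pool".toList s.toList = true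
  · rw [if_pos h4]
  rw [if_neg h4]
  by_cases h5 : PySem.Chars.isIn "dropout".toList s.toList = true
  · rw [if_pos h5]
  rw [if_neg h5]
  by_cases h6 : PySem.Chars.isIn "embed".toList s.toList = true
  · rw [if_pos h6]
  rw [if_neg h6]
  -- both sides: A's any() over the 7 activation keys vs B's emptiness test of found
  by_cases hAct : (["relu", "gelu", "silu", "sigmoid", "tanh", "softmax", "activation"].any
      (fun k => PySem.Chars.isIn k.toList s.toList)) = true
  · rw [if_pos hAct]
    have : (pvFound s.toList).isEmpty = false := by
      rw [Bool.eq_false_iff]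
      intro hemp
      have hall := (pvFound_empty_iff s.toList).mp hemp
      simp only [List.any_eq_true] at hAct
      obtain ⟨k, hk, hin⟩ := hAct
      have hmem : k ∈ pvKeysAll := by fin_cases hk <;> simp [pvKeysAll]
      rw [hall k hmem] at hin
      exact Bool.false_ne_true hin
    rw [this]
    simp
  · rw [if_neg hAct]
    have : (pvFound s.toList).isEmpty = true := by
      apply (pvFound_empty_iff s.toList).mpr
      intro k hmem
      rw [Bool.eq_false_iff]
      intro hin
      have : k ∈ pvKeysA ∨ k ∈ ["relu", "gelu", "silu", "sigmoid", "tanh", "softmax", "activation"] := by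
        fin_cases hmem <;> simp [pvKeysA]
      rcases this with h | h
      · fin_cases h
        · exact h1 hin
        · exact h2 hin
        · exact h3 hin
        · exact h4 hin
        · exact h5 hin
        · exact h6 hin
      · apply hAct
        simp only [List.any_eq_true]
        exact ⟨k, h, hin⟩
    rw [this]
    simp
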